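-- pv_equiv track=rewrite | github.com/Froodooo/aoc | aoc25/6.py | part_one
-- ===== SOURCE A (Python) =====
-- from typing import List
--
-- def part_one(data: List[str]) -> int:
--     lines = [item.split() for item in data]
--     problems = [[int(item) for item in line] for line in lines[:-1]]
--
--     operations = lines[-1]
--     columns = problems[0]
--
--     for line in problems[1:]:
--         for i in range(len(columns)):
--             if operations[i] == '+':
--                 columns[i] += line[i]
--             elif operations[i] == '*':
--                 columns[i] *= line[i]
--
--     return sum(columns)
-- ===== SOURCE B (Python) =====
-- def part_one(data):
--     rows = [[int(tok) for tok in line.split()] for line in data[:-1]]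
--     ops = data[-1].split()
--     first, rest = rows[0], rows[1:]
--     if not rest:
--         return sum(first)
--     total = 0
--     for i, x in enumerate(first):
--         if ops[i] == '+':
--             total += x + sum(row[i] for row in rest)
--         elif ops[i] == '*':
--             r = x
--             for row in rest:
--                 r *= row[i]
--             total += r
--         else:
--             total += x
--     return total
-- ===== Notes on version B (the rewrite author's own statement) =====
-- stated objective: alternative
-- what changed: Replaces A's row-major loop that mutates a running columns accumulator with a column-major decomposition: for each column index, reduce that column across the remaining rows (first value + sum for '+', running product for '*', the first row's value otherwise) and total the per-column results.
import Mathlib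
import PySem

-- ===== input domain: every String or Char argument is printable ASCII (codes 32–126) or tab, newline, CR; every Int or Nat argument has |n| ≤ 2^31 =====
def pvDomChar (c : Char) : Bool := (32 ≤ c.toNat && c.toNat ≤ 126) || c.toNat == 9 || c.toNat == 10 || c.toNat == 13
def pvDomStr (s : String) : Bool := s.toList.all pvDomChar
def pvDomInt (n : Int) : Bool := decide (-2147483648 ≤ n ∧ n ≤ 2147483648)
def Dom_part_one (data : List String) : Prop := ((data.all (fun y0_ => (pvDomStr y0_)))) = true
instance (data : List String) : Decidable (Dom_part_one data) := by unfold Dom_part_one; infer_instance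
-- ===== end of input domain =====

-- B replaces A's row-major mutating accumulation by a column-major reduce (per column: sum /
-- product / first value, then total); objective: alternative decomposition, no speed claim.

-- ===== PORT A =====
-- lines[:-1] → dropLast, lines[-1] → pyGet? (-1) (exact); int(t) → ofStr? (Pre_ excludes parse
-- failures); indexed reads use getD, exact on in-range indices (Pre_ excludes the out-of-range reads).
def part_one (data : List String) : Int :=
  let lines := data.map PySem.Str.split₀
  let problems := lines.dropLast.map (fun line => line.map (fun t => (PySem.Int.ofStr? t).getD 0))
  let operations := (PySem.List.pyGet? lines (-1)).getD []
  let columns := (PySem.List.pyGet? problems 0).getD []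
  let columns := (problems.drop 1).foldl (fun cols line =>
      (List.range cols.length).foldl (fun cols i =>
        if operations.getD i "" = "+" then cols.set i (cols.getD i 0 + line.getD i 0)
        else if operations.getD i "" = "*" then cols.set i (cols.getD i 0 * line.getD i 0)
        else cols) cols) columns
  columns.sum

-- ===== PORT B =====
def part_one_alt (data : List String) : Int :=
  let rows := data.dropLast.map (fun line => (PySem.Str.split₀ line).map (fun t => (PySem.Int.ofStr? t).getD 0))
  let ops := PySem.Str.split₀ ((PySem.List.pyGet? data (-1)).getD "")
  let first := (PySem.List.pyGet? rows 0).getD []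
  let rest := rows.drop 1
  if rest = [] then first.sum
  else (PySem.List.enumerate first 0).foldl (fun total p =>
      let i := p.1.toNat
      let x := p.2
      if ops.getD i "" = "+" then total + (x + (rest.map (fun row => row.getD i 0)).sum)
      else if ops.getD i "" = "*" then total + rest.foldl (fun r row => r * row.getD i 0) x
      else total + x) 0

-- ===== PRECONDITION & SPEC =====
-- Pre_ = exactly the inputs where Python A returns: ≥ 2 lines, every token of the data rows
-- parses as int, and (when there is more than one data row) each '+'/'*' column index is in
-- range for the operations line and for every data row.
def Pre_part_one (data : List String) : Prop :=
  2 ≤ data.length ∧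
  (∀ s ∈ data.dropLast, ∀ t ∈ PySem.Str.split₀ s, PySem.Int.ofStr? t ≠ none) ∧
  (data.length = 2 ∨
    ((PySem.Str.split₀ (data.headD "")).length ≤ (PySem.Str.split₀ (data.getLastD "")).length ∧
     ∀ s ∈ data.dropLast, ∀ i < (PySem.Str.split₀ (data.headD "")).length,
       ((PySem.Str.split₀ (data.getLastD "")).getD i "" = "+" ∨
        (PySem.Str.split₀ (data.getLastD "")).getD i "" = "*") →
       i < (PySem.Str.split₀ s).length))
instance (data : List String) : Decidable (Pre_part_one data) := by unfold Pre_part_one; infer_instance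
def pvWitness_part_one : List String := ["1 2 3", "4 5 6", "+ * -"]

def Spec_part_one (data : List String) (out : Int) : Prop := out = part_one_alt data
instance (data : List String) (out : Int) : Decidable (Spec_part_one data out) := by unfold Spec_part_one; infer_instance

-- ===== CLAIM (what is proved, stated in full; the proofs are below) =====
def Claim_equal_part_one : Prop := ∀ (data : List String), Dom_part_one data → Pre_part_one data → Spec_part_one data (part_one data)

-- ===== LEMMAS AND PROOFS =====

-- the per-cell update A applies to column i when the row `line` is folded in
def pvF (ops : List String) (line : List Int) (i : Nat) (c : Int) : Int :=
  if ops.getD i "" = "+" then c + line.getD i 0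
  else if ops.getD i "" = "*" then c * line.getD i 0 else c

theorem pv_step_at (ops : List String) (line pre rest : List Int) (x : Int) :
    (if ops.getD pre.length "" = "+" then
        (pre ++ x :: rest).set pre.length ((pre ++ x :: rest).getD pre.length 0 + line.getD pre.length 0)
      else if ops.getD pre.length "" = "*" then
        (pre ++ x :: rest).set pre.length ((pre ++ x :: rest).getD pre.length 0 * line.getD pre.length 0)
      else (pre ++ x :: rest))
    = pre ++ pvF ops line pre.length x :: rest := by
  have hget : (pre ++ x :: rest).getD pre.length 0 = x := by
    simp [List.getD]
  have hset : ∀ v : Int, (pre ++ x :: rest).set pre.length v = pre ++ v :: rest := by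
    intro v
    rw [List.set_append]
    simp
  unfold pvF
  by_cases h1 : ops.getD pre.length "" = "+"
  · rw [if_pos h1, if_pos h1, hget, hset]
  · by_cases h2 : ops.getD pre.length "" = "*"
    · rw [if_neg h1, if_neg h1, if_pos h2, if_pos h2, hget, hset]
    · rw [if_neg h1, if_neg h1, if_neg h2, if_neg h2]

theorem pv_inner_prefix (ops : List String) (line : List Int) :
    ∀ (m : Nat) (cols : List Int), m ≤ cols.length →
    (List.range m).foldl (fun cols i =>
        if ops.getD i "" = "+" then cols.set i (cols.getD i 0 + line.getD i 0)
        else if ops.getD i "" = "*" then cols.set i (cols.getD i 0 * line.getD i 0)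
        else cols) cols
    = (cols.take m).mapIdx (pvF ops line) ++ cols.drop m := by
  intro m
  induction m with
  | zero => intro cols _; simp
  | succ m ih =>
    intro cols h
    have hm : m < cols.length := by omega
    rw [List.range_succ, List.foldl_append, ih cols (by omega)]
    have hlen : ((cols.take m).mapIdx (pvF ops line)).length = m := by
      simp [Nat.min_eq_left (le_of_lt hm)]
    have hdrop : cols.drop m = cols[m] :: cols.drop (m + 1) := List.drop_eq_getElem_cons hm
    rw [hdrop, List.foldl_cons, List.foldl_nil]
    have hstep := pv_step_at ops line ((cols.take m).mapIdx (pvF ops line)) (cols.drop (m + 1)) cols[m]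
    rw [hlen] at hstep
    rw [hstep]
    have htake : cols.take (m + 1) = cols.take m ++ [cols[m]] := by
      rw [List.take_add_one]
      simp [List.getElem?_eq_getElem hm]
    rw [htake, List.mapIdx_append]
    simp [Nat.min_eq_left (le_of_lt hm)]

theorem pv_inner (ops : List String) (line cols : List Int) :
    (List.range cols.length).foldl (fun cols i =>
        if ops.getD i "" = "+" then cols.set i (cols.getD i 0 + line.getD i 0)
        else if ops.getD i "" = "*" then cols.set i (cols.getD i 0 * line.getD i 0)
        else cols) cols
    = cols.mapIdx (pvF ops line) := by
  rw [pv_inner_prefix ops line cols.length cols (le_refl _)]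
  simp

theorem pv_outer (ops : List String) :
    ∀ (L : List (List Int)) (c : List Int),
    L.foldl (fun cols line => cols.mapIdx (pvF ops line)) c
    = c.mapIdx (fun i x => L.foldl (fun acc line => pvF ops line i acc) x) := by
  intro L
  induction L with
  | nil => intro c; simp [List.mapIdx_eq_zipIdx_map]
  | cons l L ih =>
    intro c
    rw [List.foldl_cons, ih, List.mapIdx_mapIdx]
    simp only [List.foldl_cons, Function.comp_def]

theorem pv_col_plus (ops : List String) (L : List (List Int)) (i : Nat) (x : Int)
    (h : ops.getD i "" = "+") :
    L.foldl (fun acc line => pvF ops line i acc) x = x + (L.map (fun row => row.getD i 0)).sum := by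
  have hf : (fun (acc : Int) (line : List Int) => pvF ops line i acc)
       = fun acc line => acc + line.getD i 0 := by
    funext acc line; unfold pvF; rw [if_pos h]
  rw [hf, PySem.List.foldl_add]

theorem pv_col_mul (ops : List String) (L : List (List Int)) (i : Nat) (x : Int)
    (h1 : ¬ ops.getD i "" = "+") (h2 : ops.getD i "" = "*") :
    L.foldl (fun acc line => pvF ops line i acc) x = L.foldl (fun r row => r * row.getD i 0) x := by
  have hf : (fun (acc : Int) (line : List Int) => pvF ops line i acc)
       = fun acc line => acc * line.getD i 0 := by
    funext acc line; unfold pvF; rw [if_neg h1, if_pos h2]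
  rw [hf]

theorem pv_col_else (ops : List String) (L : List (List Int)) (i : Nat) (x : Int)
    (h1 : ¬ ops.getD i "" = "+") (h2 : ¬ ops.getD i "" = "*") :
    L.foldl (fun acc line => pvF ops line i acc) x = x := by
  have hf : (fun (acc : Int) (line : List Int) => pvF ops line i acc) = fun acc _ => acc := by
    funext acc line; unfold pvF; rw [if_neg h1, if_neg h2]
  rw [hf]
  induction L with
  | nil => rfl
  | cons l L ih => rw [List.foldl_cons]; exact ih

theorem pv_split_empty : PySem.Str.split₀ "" = [] := by decide

-- ===== VERDICT (by name: the statement is the Claim_ definition above) =====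
theorem part_one_spec : Claim_equal_part_one := by
  intro data _ _
  unfold Spec_part_one part_one part_one_alt
  have hops : ((PySem.List.pyGet? (data.map PySem.Str.split₀) (-1)).getD [])
      = PySem.Str.split₀ ((PySem.List.pyGet? data (-1)).getD "") := by
    rw [PySem.List.pyGet?_neg_one, PySem.List.pyGet?_neg_one, List.getLast?_map]
    cases data.getLast? with
    | none => simp [pv_split_empty]
    | some s => simp
  simp only [hops, ← List.map_dropLast, List.map_map, Function.comp_def]
  generalize PySem.Str.split₀ ((PySem.List.pyGet? data (-1)).getD "") = O
  generalize (List.map (fun line => List.map (fun t => (PySem.Int.ofStr? t).getD 0)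
      (PySem.Str.split₀ line)) data.dropLast) = P
  cases P with
  | nil => simp
  | cons c R =>
    simp only [PySem.List.pyGet?_zero_cons, Option.getD_some, List.drop_succ_cons, List.drop_zero]
    cases R with
    | nil => simp
    | cons l L =>
      rw [if_neg (by simp)]
      have hstep : (fun (cols : List Int) (line : List Int) =>
          (List.range cols.length).foldl (fun cols i =>
            if O.getD i "" = "+" then cols.set i (cols.getD i 0 + line.getD i 0)
            else if O.getD i "" = "*" then cols.set i (cols.getD i 0 * line.getD i 0)
            else cols) cols)
          = fun cols line => cols.mapIdx (pvF O line) := by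
        funext cols line; exact pv_inner O line cols
      rw [hstep, pv_outer]
      have hB : (fun (total : Int) (p : Int × Int) =>
            if O.getD p.1.toNat "" = "+" then
              total + (p.2 + ((l :: L).map (fun row => row.getD p.1.toNat 0)).sum)
            else if O.getD p.1.toNat "" = "*" then
              total + (l :: L).foldl (fun r row => r * row.getD p.1.toNat 0) p.2
            else total + p.2)
          = fun (total : Int) (p : Int × Int) => total +
            (if O.getD p.1.toNat "" = "+" then
              p.2 + ((l :: L).map (fun row => row.getD p.1.toNat 0)).sum
            else if O.getD p.1.toNat "" = "*" then
              (l :: L).foldl (fun r row => r * row.getD p.1.toNat 0) p.2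
            else p.2) := by
        funext total p
        split_ifs <;> rfl
      rw [hB, PySem.List.foldl_add, zero_add]
      rw [List.mapIdx_eq_zipIdx_map, PySem.List.enumerate_eq_zipIdx_map, List.map_map]
      apply congrArg List.sum
      apply List.map_congr_left
      intro p _
      obtain ⟨x, i⟩ := p
      simp only [Function.comp_apply]
      have hi : ((0 : Int) + (i : Int)).toNat = i := by simp
      rw [hi]
      by_cases h1 : O.getD i "" = "+"
      · rw [if_pos h1, pv_col_plus O (l :: L) i x h1]
      · by_cases h2 : O.getD i "" = "*"
        · rw [if_neg h1, if_pos h2, pv_col_mul O (l :: L) i x h1 h2]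
        · rw [if_neg h1, if_neg h2, pv_col_else O (l :: L) i x h1 h2]
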